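-- pv_equiv track=rewrite | github.com/ShariarAlamDipto/grademax | scripts/segment_human_biology_papers.py | even_distribution
-- ===== SOURCE A (Python) =====
-- def even_distribution(num_questions: int, total_pages: int) -> dict:
--     if num_questions == 0:
--         return {}
--     ppq = max(1, total_pages // num_questions)
--     questions = {}
--     for i in range(num_questions):
--         start = i * ppq
--         end   = start + ppq - 1 if i < num_questions - 1 else total_pages - 1
--         questions[i + 1] = list(range(start, min(end + 1, total_pages)))
--     return questions
-- ===== SOURCE B (Python) =====
-- def even_distribution(num_questions: int, total_pages: int) -> dict:
--     if num_questions <= 0: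
--         return {}
--     ppq = max(1, total_pages // num_questions)
--     questions = {q: [] for q in range(1, num_questions + 1)}
--     for p in range(total_pages):
--         q = min(p // ppq, num_questions - 1)
--         questions[q + 1].append(p)
--     return questions
-- ===== Notes on version B (the rewrite author's own statement) =====
-- stated objective: alternative
-- what changed: Instead of building a contiguous range of pages per question (outer loop over questions, computing start/end boundaries), B pre-seeds every question with an empty list and makes a single pass over the pages, scattering each page p into bucket min(p // ppq, num_questions - 1) + 1.
import Mathlib
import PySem

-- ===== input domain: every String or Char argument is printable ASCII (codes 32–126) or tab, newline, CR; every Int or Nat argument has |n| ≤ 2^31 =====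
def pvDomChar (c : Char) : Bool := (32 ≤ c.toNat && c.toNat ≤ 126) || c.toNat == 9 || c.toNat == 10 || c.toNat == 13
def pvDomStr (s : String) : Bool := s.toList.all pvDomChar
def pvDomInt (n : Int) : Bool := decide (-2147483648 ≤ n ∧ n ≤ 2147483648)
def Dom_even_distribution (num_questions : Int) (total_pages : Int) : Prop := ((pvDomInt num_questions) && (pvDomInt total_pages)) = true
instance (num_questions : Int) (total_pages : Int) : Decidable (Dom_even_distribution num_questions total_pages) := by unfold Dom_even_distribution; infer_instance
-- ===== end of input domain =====

-- B scatters each page once into pre-seeded per-question buckets instead of building a contiguous range per question (alternative decomposition; same cost).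

-- ===== PORT A =====
def even_distribution (num_questions : Int) (total_pages : Int) : List (Int × List Int) :=
  if num_questions = 0 then []
  else
    let ppq := max 1 (PySem.Int.floordiv total_pages num_questions)
    ((PySem.List.pyRange 0 num_questions 1).foldl
      (fun (questions : PySem.Dict Int (List Int)) i =>
        let start := i * ppq
        let «end» := if i < num_questions - 1 then start + ppq - 1 else total_pages - 1
        questions.insert (i + 1) (PySem.List.pyRange start (min («end» + 1) total_pages) 1))
      PySem.Dict.empty).items

-- ===== PORT B =====
def even_distribution_alt (num_questions : Int) (total_pages : Int) : List (Int × List Int) :=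
  if num_questions ≤ 0 then []
  else
    let ppq := max 1 (PySem.Int.floordiv total_pages num_questions)
    let init : PySem.Dict Int (List Int) :=
      (PySem.List.pyRange 1 (num_questions + 1) 1).foldl (fun d q => d.insert q []) PySem.Dict.empty
    ((PySem.List.pyRange 0 total_pages 1).foldl
      (fun d p =>
        let q := min (PySem.Int.floordiv p ppq) (num_questions - 1)
        -- questions[q+1].append(p): the key q+1 is always present in the pre-seeded dict
        d.modify (q + 1) [] (fun l => l ++ [p]))
      init).items

-- ===== PRECONDITION & SPEC =====
def Spec_even_distribution (num_questions : Int) (total_pages : Int) (out : List (Int × List Int)) : Prop := out = even_distribution_alt num_questions total_pages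
instance (num_questions : Int) (total_pages : Int) (out : List (Int × List Int)) : Decidable (Spec_even_distribution num_questions total_pages out) := by unfold Spec_even_distribution; infer_instance

-- ===== CLAIM (what is proved, stated in full; the proofs are below) =====
def Claim_equal_even_distribution : Prop := ∀ (num_questions : Int) (total_pages : Int), Dom_even_distribution num_questions total_pages → Spec_even_distribution num_questions total_pages (even_distribution num_questions total_pages)

-- ===== LEMMAS AND PROOFS =====

-- The scatter loop appends each page to the bucket its key selects.
theorem getD_scatter (key : Int → Int) (l : List Int) (d : PySem.Dict Int (List Int)) (c : Int) :
    (l.foldl (fun d p => d.modify (key p) [] (fun xs => xs ++ [p])) d).getD c []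
      = d.getD c [] ++ l.filter (fun p => key p == c) := by
  induction l generalizing d with
  | nil => simp
  | cons h t ih =>
    simp only [List.foldl_cons, List.filter_cons, ih, PySem.Dict.getD_modify]
    by_cases hc : c = key h
    · simp [hc, List.append_assoc]
    · have : (key h == c) = false := by simp [Ne.symm hc]
      simp [hc, this]

-- The scatter loop never creates a key when every bucket key is already present.
theorem keys_scatter (key : Int → Int) (l : List Int) (d : PySem.Dict Int (List Int))
    (h : ∀ p ∈ l, d.contains (key p) = true) :
    (l.foldl (fun d p => d.modify (key p) [] (fun xs => xs ++ [p])) d).keys = d.keys := by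
  induction l generalizing d with
  | nil => rfl
  | cons a t ih =>
    have ha : d.contains (key a) = true := h a (by simp)
    have hk : (d.modify (key a) [] (fun xs => xs ++ [a])).keys = d.keys := by
      rw [PySem.Dict.keys_modify]
      exact PySem.Dict.keys_insert_of_contains d _ ha
    have ht : ∀ p ∈ t, (d.modify (key a) [] (fun xs => xs ++ [a])).contains (key p) = true := by
      intro p hp
      simp [PySem.Dict.contains_modify, h p (List.mem_cons_of_mem _ hp)]
    simpa [hk] using ih _ ht

-- A dict built by inserting only empty lists defaults every key to [].
theorem getD_init (l : List Int) (d : PySem.Dict Int (List Int))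
    (hd : ∀ k, d.getD k [] = []) (k : Int) :
    (l.foldl (fun d q => d.insert q ([] : List Int)) d).getD k [] = [] := by
  induction l generalizing d with
  | nil => exact hd k
  | cons a t ih =>
    refine ih _ ?_
    intro j
    rw [PySem.Dict.getD_insert]
    split <;> simp [hd]

-- Pages of [0, tp) whose bucket is i form exactly A's contiguous block for question i.
theorem bucket_filter (nq tp ppq i : Int) (hppq : 0 < ppq)
    (h0 : 0 ≤ i) (hi : i < nq) :
    (PySem.List.pyRange 0 tp 1).filter
        (fun p => (min (PySem.Int.floordiv p ppq) (nq - 1) + 1 == i + 1))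
      = PySem.List.pyRange (i * ppq)
          (min ((if i < nq - 1 then i * ppq + ppq - 1 else tp - 1) + 1) tp) 1 := by
  refine List.Perm.eq_of_pairwise (le := (· < ·))
    (fun a b _ _ h1 h2 => absurd h2 (not_lt.mpr h1.le))
    ((PySem.List.pairwise_lt_pyRange_one 0 tp).filter _)
    (PySem.List.pairwise_lt_pyRange_one _ _) ?_
  refine (List.perm_ext_iff_of_nodup ((PySem.List.nodup_pyRange_one 0 tp).filter _)
      (PySem.List.nodup_pyRange_one _ _)).mpr ?_
  intro x
  simp only [List.mem_filter, PySem.List.mem_pyRange_one, beq_iff_eq]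
  have h1 : i ≤ PySem.Int.floordiv x ppq ↔ i * ppq ≤ x :=
    PySem.Int.le_floordiv_iff_mul_le hppq
  have h2 : PySem.Int.floordiv x ppq < i + 1 ↔ x < (i + 1) * ppq :=
    PySem.Int.floordiv_lt_iff_lt_mul hppq
  have h3 : nq - 1 ≤ PySem.Int.floordiv x ppq ↔ (nq - 1) * ppq ≤ x :=
    PySem.Int.le_floordiv_iff_mul_le hppq
  rcases lt_or_ge i (nq - 1) with hlt | hge
  · rw [if_pos hlt]
    have he : (i + 1) * ppq = i * ppq + ppq := by ring
    rw [he] at h2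
    have hs : 0 ≤ i * ppq := mul_nonneg h0 hppq.le
    generalize i * ppq = s at *
    omega
  · have heq : i = nq - 1 := by omega
    subst heq
    rw [if_neg (lt_irrefl _)]
    have hs : 0 ≤ (nq - 1) * ppq := mul_nonneg (by omega) hppq.le
    generalize (nq - 1) * ppq = s at *
    omega

theorem even_distribution_eq (nq tp : Int) : even_distribution nq tp = even_distribution_alt nq tp := by
  by_cases hnq : nq ≤ 0
  · rw [even_distribution_alt, if_pos hnq]
    rw [even_distribution]
    by_cases h0 : nq = 0
    · rw [if_pos h0]
    · rw [if_neg h0, PySem.List.pyRange_one_eq_nil (by omega)]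
      rfl
  · replace hnq : 0 < nq := by omega
    set ppq := max 1 (PySem.Int.floordiv tp nq) with hppq_def
    have hppq : 0 < ppq := lt_of_lt_of_le one_pos (le_max_left _ _)
    -- A side: fresh distinct keys, so the insert loop is a map
    have hA : even_distribution nq tp
        = (PySem.List.pyRange 0 nq 1).map (fun i => (i + 1,
            PySem.List.pyRange (i * ppq)
              (min ((if i < nq - 1 then i * ppq + ppq - 1 else tp - 1) + 1) tp) 1)) := by
      rw [even_distribution, if_neg (by omega)]
      show (List.foldl (fun (questions : PySem.Dict Int (List Int)) i =>
          questions.insert (i + 1) (PySem.List.pyRange (i * ppq)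
            (min ((if i < nq - 1 then i * ppq + ppq - 1 else tp - 1) + 1) tp) 1))
          PySem.Dict.empty (PySem.List.pyRange 0 nq 1)).items = _
      rw [PySem.Dict.items_foldl_insert_fresh (PySem.List.pyRange 0 nq 1) (fun i => i + 1)
        (fun i => PySem.List.pyRange (i * ppq)
          (min ((if i < nq - 1 then i * ppq + ppq - 1 else tp - 1) + 1) tp) 1)
        PySem.Dict.empty (fun a _ => rfl)
        ((PySem.List.nodup_pyRange_one 0 nq).map (add_left_injective 1))]
      rfl
    -- B side
    set key : Int → Int := fun p => min (PySem.Int.floordiv p ppq) (nq - 1) + 1 with hkey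
    set l0 := PySem.List.pyRange 1 (nq + 1) 1 with hl0
    set init := l0.foldl (fun d q => d.insert q ([] : List Int)) PySem.Dict.empty with hinit
    have hitems0 : init.items = l0.map (fun q => (q, ([] : List Int))) := by
      rw [hinit, PySem.Dict.items_foldl_insert_fresh l0 (fun q => q) (fun _ => ([] : List Int))
        PySem.Dict.empty (fun a _ => rfl)
        (by simpa using PySem.List.nodup_pyRange_one 1 (nq + 1))]
      rfl
    have hkeys0 : init.keys = l0 := by
      simp only [PySem.Dict.keys, hitems0, List.map_map]
      have hcomp : (Prod.fst ∘ fun q : Int => (q, ([] : List Int))) = fun q => q := rfl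
      rw [hcomp, List.map_id']
    have hgetD0 : ∀ k, init.getD k [] = [] := by
      intro k
      exact getD_init l0 PySem.Dict.empty (fun _ => rfl) k
    have hcont : ∀ p ∈ PySem.List.pyRange 0 tp 1, init.contains (key p) = true := by
      intro p hp
      rw [PySem.List.mem_pyRange_one] at hp
      have hfd : PySem.Int.floordiv p ppq = p / ppq := PySem.Int.floordiv_eq_ediv_of_pos hppq
      have hf : 0 ≤ PySem.Int.floordiv p ppq := by
        rw [hfd]; exact Int.ediv_nonneg hp.1 hppq.le
      have hb : key p ∈ l0 := by
        rw [hl0, PySem.List.mem_pyRange_one]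
        show 1 ≤ min (PySem.Int.floordiv p ppq) (nq - 1) + 1 ∧
          min (PySem.Int.floordiv p ppq) (nq - 1) + 1 < nq + 1
        omega
      rw [PySem.Dict.contains_iff_mem_keys, hkeys0]
      exact hb
    have hB : even_distribution_alt nq tp
        = l0.map (fun k => (k, (PySem.List.pyRange 0 tp 1).filter (fun p => key p == k))) := by
      rw [even_distribution_alt, if_neg (by omega)]
      have hkeysF : ((PySem.List.pyRange 0 tp 1).foldl
          (fun d p => d.modify (key p) [] (fun xs => xs ++ [p])) init).keys = l0 := by
        rw [keys_scatter key _ init hcont, hkeys0]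
      have hnodF : ((PySem.List.pyRange 0 tp 1).foldl
          (fun d p => d.modify (key p) [] (fun xs => xs ++ [p])) init).keys.Nodup := by
        rw [hkeysF, hl0]; exact PySem.List.nodup_pyRange_one _ _
      show ((PySem.List.pyRange 0 tp 1).foldl
          (fun d p => d.modify (key p) [] (fun xs => xs ++ [p])) init).items
        = l0.map (fun k => (k, (PySem.List.pyRange 0 tp 1).filter (fun p => key p == k)))
      rw [PySem.Dict.items_eq_map_keys _ hnodF [], hkeysF]
      apply List.map_congr_left
      intro k _
      rw [getD_scatter key _ init k, hgetD0 k, List.nil_append]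
    -- assemble
    have hshift : l0 = (PySem.List.pyRange 0 nq 1).map (fun i => i + 1) := by
      rw [hl0, PySem.List.pyRange_one, PySem.List.pyRange_one, List.map_map]
      have : nq + 1 - 1 = nq - 0 := by ring
      rw [this]
      apply List.map_congr_left
      intro k _
      simp only [Function.comp_apply]
      omega
    rw [hA, hB, hshift, List.map_map]
    apply List.map_congr_left
    intro i hi
    rw [PySem.List.mem_pyRange_one] at hi
    simp only [Function.comp_apply]
    show (i + 1, PySem.List.pyRange (i * ppq)
        (min ((if i < nq - 1 then i * ppq + ppq - 1 else tp - 1) + 1) tp) 1)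
      = (i + 1, (PySem.List.pyRange 0 tp 1).filter
          (fun p => (min (PySem.Int.floordiv p ppq) (nq - 1) + 1 == i + 1)))
    rw [bucket_filter nq tp ppq i hppq hi.1 hi.2]
-- ===== VERDICT (by name: the statement is the Claim_ definition above) =====
theorem even_distribution_spec : Claim_equal_even_distribution := by
  intro nq tp _
  exact even_distribution_eq nq tp
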